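-- pv_equiv track=rewrite | github.com/ZerotakerZX/Python | TestFormulas/operators.py | task654
-- ===== SOURCE A (Python) =====
-- def task654(number):
--     list = []
--     str_number = str(number)
--     str_number_inv = str_number[::-1]
--     for i in str_number_inv:
--         list.append(int(i))  # кое как обратили число и превратили в список цифр
--     return all(i > j for i, j in zip(list, list[
--                                            1:]))  # можно просчитать два числа разом, одно начав с начала списка, другое со второй позиции
-- ===== SOURCE B (Python) =====
-- def task654(number):
--     digits = [int(c) for c in str(number)]
--     return digits == sorted(digits) and len(set(digits)) == len(digits)
-- ===== Notes on version B (the rewrite author's own statement) =====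
-- stated objective: idiomatic
-- what changed: Replaces the reversed pairwise adjacency scan with a forward digit list compared against its sorted copy plus a set-based distinctness check (strictly increasing forward digits = strictly decreasing reversed digits).
import Mathlib
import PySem

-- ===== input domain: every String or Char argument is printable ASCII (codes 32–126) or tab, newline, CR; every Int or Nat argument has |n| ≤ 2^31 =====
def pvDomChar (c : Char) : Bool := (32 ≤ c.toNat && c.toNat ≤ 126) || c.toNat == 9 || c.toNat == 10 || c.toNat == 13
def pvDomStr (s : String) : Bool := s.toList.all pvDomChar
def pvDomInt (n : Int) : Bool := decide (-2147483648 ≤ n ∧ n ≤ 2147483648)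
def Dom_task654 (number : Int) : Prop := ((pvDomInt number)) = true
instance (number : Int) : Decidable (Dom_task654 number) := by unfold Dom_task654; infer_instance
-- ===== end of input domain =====

-- B decides strict monotonicity by sort-and-compare plus a set distinctness check instead of A's reversed pairwise scan (idiomatic, not faster).

-- ===== PORT A =====
def task654 (number : Int) : Bool :=
  let str_number := PySem.Int.toStr number
  -- str_number[::-1]; slice? with step -1 never returns none, getD "" is unreachable
  let str_number_inv := (PySem.Str.slice? str_number none none (-1)).getD ""
  -- the append loop building `list`; int(i) raises on non-digit chars (negative numbers) — excluded by Pre_, getD 0 unreachable inside Pre_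
  let list := str_number_inv.toList.foldl
    (fun acc c => acc ++ [(PySem.Int.ofStr? (String.mk [c])).getD 0]) []
  -- all(i > j for i, j in zip(list, list[1:]))
  (list.zip (list.drop 1)).all (fun p => decide (p.1 > p.2))

-- ===== PORT B =====
def task654_alt (number : Int) : Bool :=
  let digits := (PySem.Int.toStr number).toList.map
    (fun c => (PySem.Int.ofStr? (String.mk [c])).getD 0)
  decide (digits = PySem.List.sorted digits (fun x => x) false)
    && (PySem.Set.len (PySem.Set.ofList digits) == (digits.length : Int))

-- ===== PRECONDITION & SPEC =====
-- Pre_: A raises ValueError on int('-') for negative numbers, so only nonnegative inputs are claimed.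
def Pre_task654 (number : Int) : Prop := 0 ≤ number
instance (number : Int) : Decidable (Pre_task654 number) := by unfold Pre_task654; infer_instance
def pvWitness_task654 : Int := 134
def Spec_task654 (number : Int) (out : Bool) : Prop := out = task654_alt number
instance (number : Int) (out : Bool) : Decidable (Spec_task654 number out) := by unfold Spec_task654; infer_instance

-- ===== CLAIM (what is proved, stated in full; the proofs are below) =====
def Claim_equal_task654 : Prop := ∀ (number : Int), Dom_task654 number → Pre_task654 number → Spec_task654 number (task654 number)

-- ===== LEMMAS AND PROOFS =====

-- the append-fold building A's list is a map
lemma foldl_append_map (cs : List Char) (acc : List Int) :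
    cs.foldl (fun acc c => acc ++ [(PySem.Int.ofStr? (String.mk [c])).getD 0]) acc
      = acc ++ cs.map (fun c => (PySem.Int.ofStr? (String.mk [c])).getD 0) := by
  induction cs generalizing acc with
  | nil => simp [List.foldl]
  | cons c cs ih => simp [List.foldl, ih]

-- the adjacent-pairs scan is IsChain
lemma zipAll_eq_isChain (l : List Int) :
    ((l.zip (l.drop 1)).all (fun p => decide (p.1 > p.2)))
      = decide (l.IsChain (· > ·)) := by
  induction l with
  | nil => simp
  | cons a l ih =>
    cases l with
    | nil => simp
    | cons b t =>
      simp only [List.drop, List.zip_cons_cons, List.all_cons] at *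
      by_cases h : a > b <;> simp [h, ih, List.isChain_cons_cons]

-- PySem.Set.ofList xs is a sublist of xs
lemma ofList_sublist {α : Type} [BEq α] (xs : List α) :
    ∃ t, PySem.Set.ofList xs = t ∧ t.Sublist xs := by
  suffices h : ∀ (xs : List α) (acc : List α),
      ∃ t, xs.foldl PySem.Set.add acc = acc ++ t ∧ t.Sublist xs by
    obtain ⟨t, ht, hs⟩ := h xs []
    exact ⟨t, by simpa [PySem.Set.ofList, PySem.Set.empty] using ht, hs⟩
  intro xs
  induction xs with
  | nil => exact fun acc => ⟨[], by simp, List.Sublist.refl _⟩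
  | cons x xs ih =>
    intro acc
    by_cases h : acc.contains x
    · obtain ⟨t, ht, hs⟩ := ih acc
      refine ⟨t, ?_, hs.cons _⟩
      simpa [List.foldl, PySem.Set.add, h] using ht
    · obtain ⟨t, ht, hs⟩ := ih (acc ++ [x])
      refine ⟨x :: t, ?_, hs.cons₂ _⟩
      simpa [List.foldl, PySem.Set.add, h] using ht

lemma ofList_length_eq_iff (xs : List Int) :
    (PySem.Set.ofList xs).length = xs.length ↔ xs.Nodup := by
  constructor
  · intro h
    obtain ⟨t, ht, hs⟩ := ofList_sublist xs
    have : t = xs := hs.eq_of_length (ht ▸ h)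
    have hn : (PySem.Set.ofList xs).Nodup := PySem.Set.nodup_ofList xs
    rw [ht, this] at hn
    exact hn
  · intro h
    rw [PySem.Set.ofList_eq_self_of_nodup xs h]

lemma sorted_eq_iff (xs : List Int) :
    xs = PySem.List.sorted xs (fun x => x) false ↔ xs.Pairwise (· ≤ ·) := by
  constructor
  · intro h
    have := PySem.List.sorted_pairwise xs (fun x => x)
    rw [← h] at this
    exact this
  · intro h
    exact (PySem.List.sorted_eq_self_of_pairwise xs (fun x => x) h).symm

lemma pairwise_lt_iff (xs : List Int) :
    xs.Pairwise (· < ·) ↔ xs.Pairwise (· ≤ ·) ∧ xs.Nodup := by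
  constructor
  · exact fun h => ⟨h.imp le_of_lt, h.imp ne_of_lt⟩
  · rintro ⟨h1, h2⟩
    have := List.pairwise_and_iff.2 ⟨h1, h2⟩
    exact this.imp (fun h => lt_of_le_of_ne h.1 h.2)

-- core: the two tests agree on any integer list
lemma core (ds : List Int) :
    ((ds.reverse.zip (ds.reverse.drop 1)).all (fun p => decide (p.1 > p.2)))
      = (decide (ds = PySem.List.sorted ds (fun x => x) false)
          && (PySem.Set.len (PySem.Set.ofList ds) == (ds.length : Int))) := by
  rw [zipAll_eq_isChain]
  have h1 : ds.reverse.IsChain (· > ·) ↔ ds.Pairwise (· < ·) := by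
    rw [List.isChain_reverse]
    have he : (fun (a b : Int) => b > a) = (fun (a b : Int) => a < b) := rfl
    rw [he, List.isChain_iff_pairwise]
  by_cases hp : ds.Pairwise (· < ·)
  · have e0 : decide (ds.reverse.IsChain (· > ·)) = true := decide_eq_true (h1.mpr hp)
    rw [pairwise_lt_iff] at hp
    have e1 := (sorted_eq_iff ds).mpr hp.1
    have e2 := (ofList_length_eq_iff ds).mpr hp.2
    rw [e0]
    simp [PySem.Set.len, ← e1, e2]
  · have e0 : decide (ds.reverse.IsChain (· > ·)) = false :=
      decide_eq_false (fun hc => hp (h1.mp hc))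
    rw [e0]
    by_cases hs : ds = PySem.List.sorted ds (fun x => x) false
    · have hnd : ¬ ds.Nodup := fun hn =>
        hp ((pairwise_lt_iff ds).mpr ⟨(sorted_eq_iff ds).mp hs, hn⟩)
      have hl : (PySem.Set.ofList ds).length ≠ ds.length := fun h =>
        hnd ((ofList_length_eq_iff ds).mp h)
      simp [PySem.Set.len, hl]
    · simp [hs]

-- ===== VERDICT (by name: the statement is the Claim_ definition above) =====
theorem task654_spec : Claim_equal_task654 := by
  intro number _ _
  unfold Spec_task654 task654 task654_alt
  simp only [PySem.Str.slice?_none_none_neg_one, Option.getD_some]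
  rw [show (String.ofList (PySem.Int.toStr number).toList.reverse).toList
        = (PySem.Int.toStr number).toList.reverse by simp,
      foldl_append_map, List.nil_append, List.map_reverse]
  exact core _
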